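-- pv_equiv track=rewrite | github.com/pnkmht135/Symbolic-Logic-and-Applications-Project | Assignment1.py | remove_outer_brackets
-- ===== SOURCE A (Python) =====
-- def remove_outer_brackets(s):
--     if not s or s[0] != '(' or s[-1] != ')':
--         return s
--
--     depth = 0
--     for i, char in enumerate(s):
--         if char == '(':
--             depth += 1
--         elif char == ')':
--             depth -= 1
--         if depth == 0 and i < len(s) - 1: # not fully wrapped
--             return s
--     return s[1:-1] # fully wrapped
-- ===== SOURCE B (Python) =====
-- def remove_outer_brackets(s):
--     if not s or s[0] != '(' or s[-1] != ')':
--         return s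
--     # Rewrite the inner part (brackets only) to canonical form by cancelling
--     # matched "()" pairs; the wrap is proper iff no unmatched ')' survives.
--     u = ''.join(ch for ch in s[1:-1] if ch in '()')
--     while '()' in u:
--         u = u.replace('()', '')
--     return s if ')' in u else s[1:-1]
-- ===== Notes on version B (the rewrite author's own statement) =====
-- stated objective: alternative
-- what changed: Replaces A's indexed depth-counting scan with early exit by a string-rewriting algorithm: filter the inner substring to brackets only, repeatedly delete adjacent matched open-close pairs with str.replace until a fixpoint, and strip the outer pair iff no unmatched closing bracket survives in the canonical residue.
import Mathlib
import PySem

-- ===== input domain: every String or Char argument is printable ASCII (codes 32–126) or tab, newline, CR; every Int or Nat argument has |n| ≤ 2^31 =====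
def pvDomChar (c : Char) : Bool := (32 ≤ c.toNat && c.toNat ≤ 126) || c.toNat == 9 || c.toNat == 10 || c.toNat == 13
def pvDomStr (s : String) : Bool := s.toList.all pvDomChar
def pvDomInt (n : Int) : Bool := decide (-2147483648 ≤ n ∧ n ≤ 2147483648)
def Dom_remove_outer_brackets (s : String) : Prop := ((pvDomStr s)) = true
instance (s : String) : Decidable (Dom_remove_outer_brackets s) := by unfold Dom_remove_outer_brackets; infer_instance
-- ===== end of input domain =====

-- B replaces A's indexed depth-counting scan by a string-rewriting algorithm: cancel adjacent
-- matched bracket pairs to a fixpoint on the bracket-filtered inner substring, then test for an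
-- unmatched closing bracket. Same return value on every input; objective: alternative.

-- ===== PORT A =====
def robLoopA (s : String) (n : Int) : List (Int × Char) → Int → String
  | [], _ => PySem.Str.slice s (some 1) (some (-1))
  | (i, c) :: rest, depth =>
    let depth' := if c = '(' then depth + 1 else if c = ')' then depth - 1 else depth
    if depth' = 0 ∧ i < n - 1 then s else robLoopA s n rest depth'

def remove_outer_brackets (s : String) : String :=
  if s.toList = [] ∨ PySem.Str.pyGet? s 0 ≠ some '(' ∨ PySem.Str.pyGet? s (-1) ≠ some ')' then s
  else robLoopA s ((s.toList.length : Int)) (PySem.List.enumerate s.toList 0) 0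

-- ===== PORT B =====
-- repSpec is what one pass of u.replace("()", "") computes (proved in replace_eq_repSpec);
-- the while loop's termination measure cites it.
def repSpec : List Char → List Char
  | '(' :: ')' :: t => repSpec t
  | c :: t => c :: repSpec t
  | [] => []

theorem repSpec_cons_ne (c : Char) (t : List Char) (h : ¬ (c = '(' ∧ t.head? = some ')')) :
    repSpec (c :: t) = c :: repSpec t := by
  cases t with
  | nil => simp [repSpec]
  | cons c2 t2 =>
    by_cases hc : c = '('
    · have h2 : c2 ≠ ')' := fun hh => h ⟨hc, by simp [hh]⟩
      subst hc; simp [repSpec, h2]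
    · simp [repSpec, hc]

theorem replace_go_eq_repSpec (fuel : Nat) (l acc : List Char) (h : l.length ≤ fuel) :
    PySem.Chars.replace.go ['(', ')'] [] fuel l acc = acc.reverse ++ repSpec l := by
  induction fuel generalizing l acc with
  | zero =>
    cases l with
    | nil => simp [PySem.Chars.replace.go, repSpec]
    | cons c t => simp at h
  | succ fuel ih =>
    cases l with
    | nil => simp [PySem.Chars.replace.go, repSpec]
    | cons c t =>
      rw [PySem.Chars.replace.go]
      by_cases hp : List.isPrefixOf ['(', ')'] (c :: t) = true
      · cases t with
        | nil => simp [List.isPrefixOf] at hp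
        | cons c2 t2 =>
          simp [List.isPrefixOf] at hp
          obtain ⟨rfl, rfl⟩ := hp
          have hp' : List.isPrefixOf ['(', ')'] ('(' :: ')' :: t2) = true := by simp [List.isPrefixOf]
          simp only [hp', if_pos, List.drop_succ_cons, List.length_cons, List.length_nil,
            List.drop_zero, List.reverse_nil, List.nil_append]
          rw [ih t2 acc (by simp at h; omega)]
          simp [repSpec]
      · simp only [hp, if_neg, Bool.false_eq_true, not_false_eq_true]
        rw [ih t (c :: acc) (by simp at h; omega)]
        have hne : ¬ (c = '(' ∧ t.head? = some ')') := by
          rintro ⟨rfl, hh⟩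
          cases t with
          | nil => simp at hh
          | cons c2 t2 =>
            simp at hh; subst hh
            simp [List.isPrefixOf] at hp
        rw [repSpec_cons_ne c t hne]
        simp

theorem replace_eq_repSpec (u : List Char) :
    PySem.Chars.replace u ['(', ')'] [] = repSpec u := by
  rw [PySem.Chars.replace]
  simp [replace_go_eq_repSpec u.length u [] le_rfl]

theorem repSpec_length_le (u : List Char) : (repSpec u).length ≤ u.length := by
  fun_induction repSpec u <;> simp_all; omega

theorem repSpec_length_lt (u : List Char) (h : ['(', ')'] <:+: u) :
    (repSpec u).length < u.length := by
  fun_induction repSpec u with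
  | case1 t ih =>
    have := repSpec_length_le t; simp; omega
  | case2 c t h1 ih =>
    have ht : ['(', ')'] <:+: t := by
      rcases h with ⟨pre, suf, hps⟩
      cases pre with
      | nil =>
        simp at hps
        exact absurd hps.2.symm (by intro hh; exact (h1 suf hps.1.symm hh).elim)
      | cons p ps =>
        simp at hps
        exact ⟨ps, suf, by simpa using hps.2⟩
    have := ih ht
    simp at this ⊢
    omega
  | case3 => simp at h

def bWhile (u : List Char) : List Char :=
  if PySem.Chars.isIn ['(', ')'] u then bWhile (PySem.Chars.replace u ['(', ')'] []) else u
termination_by u.length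
decreasing_by
  rename_i h
  rw [replace_eq_repSpec]
  exact repSpec_length_lt u ((PySem.Chars.isIn_iff_infix _ _).mp h)

def remove_outer_brackets_alt (s : String) : String :=
  if s.toList = [] ∨ PySem.Str.pyGet? s 0 ≠ some '(' ∨ PySem.Str.pyGet? s (-1) ≠ some ')' then s
  else
    let u := PySem.Chars.join []
      (((PySem.List.slice s.toList (some 1) (some (-1))).filter
          (fun ch => PySem.Chars.isIn [ch] ['(', ')'])).map (fun ch => [ch]))
    if PySem.Chars.isIn [')'] (bWhile u) then s
    else PySem.Str.slice s (some 1) (some (-1))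

-- ===== PRECONDITION & SPEC =====
def Spec_remove_outer_brackets (s : String) (out : String) : Prop := out = remove_outer_brackets_alt s
instance (s : String) (out : String) : Decidable (Spec_remove_outer_brackets s out) := by unfold Spec_remove_outer_brackets; infer_instance

-- ===== CLAIM (what is proved, stated in full; the proofs are below) =====
def Claim_equal_remove_outer_brackets : Prop := ∀ (s : String), Dom_remove_outer_brackets s → Spec_remove_outer_brackets s (remove_outer_brackets s)

-- ===== LEMMAS AND PROOFS =====
-- the running-depth prefix list of A's scan, starting from depth d
def robScan : List Char → Int → List Int
  | [], _ => []
  | c :: rest, d =>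
    (if c = '(' then d + 1 else if c = ')' then d - 1 else d) ::
      robScan rest (if c = '(' then d + 1 else if c = ')' then d - 1 else d)

theorem robLoopA_eq (s : String) (l : List Char) (i : Int) (n : Int) (d : Int)
    (h : i + l.length = n) :
    robLoopA s n (PySem.List.enumerate l i) d
      = (if (0 : Int) ∈ (robScan l d).dropLast then s
         else PySem.Str.slice s (some 1) (some (-1))) := by
  induction l generalizing i d with
  | nil => simp [PySem.List.enumerate_nil, robLoopA, robScan]
  | cons c rest ih =>
    rw [PySem.List.enumerate_cons]
    simp only [robLoopA, robScan]
    cases rest with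
    | nil =>
      have hi : ¬ i < n - 1 := by simp at h; omega
      simp [hi, robLoopA, robScan]
    | cons c2 rest2 =>
      have hi : i < n - 1 := by simp at h; omega
      have h2 : (i + 1) + ((c2 :: rest2).length : Int) = n := by simp at h ⊢; omega
      rw [ih (i + 1) _ h2]
      have hne : robScan (c2 :: rest2)
          (if c = '(' then d + 1 else if c = ')' then d - 1 else d) ≠ [] := by simp [robScan]
      by_cases hz : (if c = '(' then d + 1 else if c = ')' then d - 1 else d) = 0
      · rw [hz] at hne
        simp [hz, hi, List.dropLast_cons_of_ne_nil hne]
      · simp [hz, hi, List.dropLast_cons_of_ne_nil hne, Ne.symm hz]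

-- lowest depth reached over all prefixes (including the empty one), starting at d
def low : List Char → Int → Int
  | [], d => d
  | c :: t, d => min d (low t (if c = '(' then d + 1 else if c = ')' then d - 1 else d))

theorem low_le (t : List Char) (d : Int) : low t d ≤ d := by
  cases t <;> simp [low]

theorem low_le_of_mem (t : List Char) (d x : Int) (hx : x ∈ robScan t d) : low t d ≤ x := by
  induction t generalizing d with
  | nil => simp [robScan] at hx
  | cons c t ih =>
    simp [robScan] at hx
    rcases hx with rfl | hx
    · exact le_trans (min_le_right _ _) (low_le _ _)
    · exact le_trans (min_le_right _ _) (ih _ hx)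

theorem neg_one_mem_robScan (t : List Char) (d : Int) (hd : 0 ≤ d) (h : low t d < 0) :
    (-1 : Int) ∈ robScan t d := by
  induction t generalizing d with
  | nil => simp [low] at h; omega
  | cons c t ih =>
    simp [low] at h
    simp [robScan]
    set d' := if c = '(' then d + 1 else if c = ')' then d - 1 else d with hd'
    by_cases h0 : 0 ≤ d'
    · right
      apply ih d' h0
      rcases h with h | h
      · omega
      · exact h
    · left
      have : d - 1 ≤ d' := by simp [hd']; split_ifs <;> omega
      omega

theorem low_lt_iff (t : List Char) (d : Int) (hd : 0 ≤ d) :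
    low t d < 0 ↔ (-1 : Int) ∈ robScan t d := by
  constructor
  · exact neg_one_mem_robScan t d hd
  · intro h
    have := low_le_of_mem t d _ h
    omega

theorem robScan_map_add (t : List Char) (d e : Int) :
    robScan t (d + e) = (robScan t d).map (· + e) := by
  induction t generalizing d with
  | nil => simp [robScan]
  | cons c t ih =>
    simp only [robScan]
    have hstep : (if c = '(' then d + e + 1 else if c = ')' then d + e - 1 else d + e)
        = (if c = '(' then d + 1 else if c = ')' then d - 1 else d) + e := by
      split_ifs <;> ring
    rw [hstep, ih]
    simp

-- the depth after scanning a whole list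
def finDepth : List Char → Int → Int
  | [], d => d
  | c :: t, d => finDepth t (if c = '(' then d + 1 else if c = ')' then d - 1 else d)

theorem robScan_append (a b : List Char) (d : Int) :
    robScan (a ++ b) d = robScan a d ++ robScan b (finDepth a d) := by
  induction a generalizing d with
  | nil => simp [robScan, finDepth]
  | cons c a ih => simp only [List.cons_append, robScan, finDepth, ih]

theorem slice_one_neg_one (c d : Char) (mid : List Char) :
    PySem.List.slice (c :: mid ++ [d]) (some 1) (some (-1)) = mid := by
  simp only [PySem.List.slice, PySem.List.clampIdx]
  norm_num
  rw [if_neg (by omega : ¬ ((mid.length : Int) + 1 < 0))]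
  rw [show mid.length + 1 - 1 = mid.length by omega]
  exact List.take_left' rfl

theorem isBracket_iff (c : Char) : PySem.Chars.isIn [c] ['(', ')'] = true ↔ (c = '(' ∨ c = ')') := by
  rw [PySem.Chars.isIn_iff_infix, List.singleton_infix_iff]
  simp

theorem low_filter (t : List Char) (d : Int) :
    low (t.filter (fun ch => PySem.Chars.isIn [ch] ['(', ')'])) d = low t d := by
  induction t generalizing d with
  | nil => simp
  | cons c t ih =>
    rw [List.filter_cons]
    by_cases hb : PySem.Chars.isIn [c] ['(', ')'] = true
    · simp only [hb, if_pos, low, ih]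
    · have hc : ¬ (c = '(') ∧ ¬ (c = ')') := by
        rw [isBracket_iff] at hb; tauto
      simp only [hb, Bool.false_eq_true, if_false, low, hc.1, hc.2, ih]
      have := low_le t d
      omega

theorem low_repSpec (u : List Char) (d : Int) : low (repSpec u) d = low u d := by
  fun_induction repSpec u generalizing d with
  | case1 t ih =>
    simp only [low, ih]
    have := low_le t d
    simp; omega
  | case2 c t h1 ih =>
    simp only [low, ih]
  | case3 => rfl

theorem repSpec_subset (u : List Char) (c : Char) (h : c ∈ repSpec u) : c ∈ u := by
  fun_induction repSpec u with
  | case1 t ih => simp [ih h]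
  | case2 c2 t h1 ih =>
    simp at h ⊢
    rcases h with rfl | h
    · left; rfl
    · right; exact ih h
  | case3 => simp at h

theorem bWhile_low (u : List Char) (d : Int) : low (bWhile u) d = low u d := by
  fun_induction bWhile u with
  | case1 u h ih => rw [ih, replace_eq_repSpec, low_repSpec]
  | case2 u h => rfl

theorem bWhile_subset (u : List Char) (c : Char) (h : c ∈ bWhile u) : c ∈ u := by
  fun_induction bWhile u with
  | case1 u h2 ih =>
    have := ih h
    rw [replace_eq_repSpec] at this
    exact repSpec_subset u c this
  | case2 u h2 => exact h

theorem bWhile_no_pair (u : List Char) : ¬ (['(', ')'] <:+: bWhile u) := by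
  fun_induction bWhile u with
  | case1 u h ih => exact ih
  | case2 u h =>
    intro hinf
    exact absurd ((PySem.Chars.isIn_iff_infix _ _).mpr hinf) (by simp_all)

theorem all_open_of_no_pair (v : List Char) (hb : ∀ c ∈ v, c = '(' ∨ c = ')')
    (hnp : ¬ (['(', ')'] <:+: v)) (hh : v.head? = some '(') : ∀ c ∈ v, c = '(' := by
  induction v with
  | nil => simp
  | cons c t ih =>
    simp at hh
    subst hh
    intro c hc
    simp at hc
    rcases hc with rfl | hc
    · rfl
    cases t with
    | nil => simp at hc
    | cons c2 t2 =>
      have hc2 : c2 = '(' := by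
        rcases hb c2 (by simp) with h | h
        · exact h
        · exact absurd ⟨[], t2, by simp [h]⟩ hnp
      refine ih (fun x hx => hb x (by simp [hx])) ?_ (by simp [hc2]) c hc
      intro ⟨pre, suf, hps⟩
      exact hnp ⟨'(' :: pre, suf, by simp [← hps]⟩

theorem low_all_open (v : List Char) (hv : ∀ c ∈ v, c = '(') (d : Int) : low v d = d := by
  induction v generalizing d with
  | nil => rfl
  | cons c t ih =>
    have hc : c = '(' := hv c (by simp)
    have ht := ih (fun x hx => hv x (by simp [hx])) (d + 1)
    simp [low, hc, ht]

theorem close_mem_iff_low (v : List Char) (hb : ∀ c ∈ v, c = '(' ∨ c = ')')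
    (hnp : ¬ (['(', ')'] <:+: v)) (d : Int) : ')' ∈ v ↔ low v d < d := by
  cases v with
  | nil => simp [low]
  | cons c t =>
    rcases hb c (by simp) with rfl | rfl
    · have hall := all_open_of_no_pair _ hb hnp (by simp)
      rw [low_all_open _ hall]
      constructor
      · intro h
        exact absurd (hall ')' h) (by decide)
      · omega
    · constructor
      · intro _
        simp only [low]
        have := low_le t (d - 1)
        simp; omega
      · intro _
        simp

-- the main bridge: A's strip condition equals B's residue test, for s = '(' :: mid ++ [')']
theorem cond_bridge (mid : List Char) :
    ((0 : Int) ∈ (robScan ('(' :: (mid ++ [')'])) 0).dropLast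
      ↔ PySem.Chars.isIn [')']
          (bWhile (mid.filter (fun ch => PySem.Chars.isIn [ch] ['(', ')']))) = true) := by
  have hL : (0 : Int) ∈ (robScan ('(' :: (mid ++ [')'])) 0).dropLast ↔ low mid 0 < 0 := by
    have h1 : robScan ('(' :: (mid ++ [')'])) 0 = 1 :: (robScan mid 1 ++ [finDepth mid 1 - 1]) := by
      simp [robScan, robScan_append]
    rw [h1, show (1 : Int) :: (robScan mid 1 ++ [finDepth mid 1 - 1])
        = ((1 : Int) :: robScan mid 1) ++ [finDepth mid 1 - 1] by simp,
      List.dropLast_concat]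
    have h2 : robScan mid 1 = (robScan mid 0).map (· + 1) := by
      have := robScan_map_add mid 0 1
      simpa using this
    rw [h2]
    simp only [List.mem_cons, List.mem_map]
    constructor
    · rintro (h | ⟨x, hx, hx1⟩)
      · omega
      · have : x = -1 := by omega
        subst this
        exact (low_lt_iff mid 0 le_rfl).mpr hx
    · intro h
      right
      exact ⟨-1, (low_lt_iff mid 0 le_rfl).mp h, by omega⟩
  set f := mid.filter (fun ch => PySem.Chars.isIn [ch] ['(', ')']) with hf
  have hR : PySem.Chars.isIn [')'] (bWhile f) = true ↔ low mid 0 < 0 := by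
    rw [PySem.Chars.isIn_iff_infix, List.singleton_infix_iff]
    have hb : ∀ c ∈ bWhile f, c = '(' ∨ c = ')' := by
      intro c hc
      have := bWhile_subset f c hc
      rw [hf] at this
      have := List.of_mem_filter this
      exact (isBracket_iff c).mp this
    rw [close_mem_iff_low (bWhile f) hb (bWhile_no_pair f) 0, bWhile_low, hf, low_filter]
  rw [hL, hR]

-- ===== VERDICT (by name: the statement is the Claim_ definition above) =====
theorem pyGet_neg_one {α : Type} (l : List α) : PySem.List.pyGet? l (-1) = l.getLast? := by
  simp only [PySem.List.pyGet?, PySem.List.pyIdx?]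
  rw [if_neg (by omega)]
  by_cases h : 1 ≤ l.length
  · rw [if_pos (by omega)]
    show l[l.length - (1:Int).toNat]? = _
    rw [List.getLast?_eq_getElem?]
    norm_num
  · rw [if_neg (by omega)]
    have : l = [] := List.eq_nil_of_length_eq_zero (by omega)
    simp [this]

theorem remove_outer_brackets_spec : Claim_equal_remove_outer_brackets := by
  intro s _
  unfold Spec_remove_outer_brackets remove_outer_brackets remove_outer_brackets_alt
  by_cases hg : s.toList = [] ∨ PySem.Str.pyGet? s 0 ≠ some '(' ∨ PySem.Str.pyGet? s (-1) ≠ some ')'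
  · rw [if_pos hg, if_pos hg]
  · rw [if_neg hg, if_neg hg]
    push Not at hg
    obtain ⟨hne, h0, hlast⟩ := hg
    obtain ⟨mid, hmid⟩ : ∃ mid, s.toList = '(' :: mid ++ [')'] := by
      rcases List.eq_nil_or_concat s.toList with h | ⟨ys, lc, h⟩
      · exact absurd h hne
      have hlc : lc = ')' := by
        have : PySem.Str.pyGet? s (-1) = s.toList.getLast? := by
          simp only [PySem.Str.pyGet?_eq, PySem.Chars.pyGet?_eq_listPyGet?]
          exact pyGet_neg_one s.toList
        rw [List.concat_eq_append] at h
        rw [this, h, List.getLast?_concat] at hlast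
        simpa using hlast
      cases ys with
      | nil =>
        exfalso
        have : PySem.Str.pyGet? s 0 = s.toList[0]? := by simp [pysem]
        rw [this, h, hlc] at h0
        simp at h0
      | cons c ys' =>
        have hc : c = '(' := by
          have : PySem.Str.pyGet? s 0 = s.toList[0]? := by simp [pysem]
          rw [this, h] at h0
          simpa using h0
        exact ⟨ys', by rw [h, hc, hlc]; simp⟩
    rw [robLoopA_eq s s.toList 0 _ 0 (by simp)]
    rw [hmid, slice_one_neg_one]
    simp only [List.cons_append, PySem.Chars.join_nil_singletons]
    have hbr := cond_bridge mid
    by_cases hc : (0 : Int) ∈ (robScan ('(' :: (mid ++ [')'])) 0).dropLast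
    · rw [if_pos hc, if_pos (hbr.mp hc)]
    · rw [if_neg hc, if_neg (fun h => hc (hbr.mpr h))]
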